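-- pv_equiv track=rewrite | github.com/shreyas-dhakal/numcompute | numcompute/utils.py | batch_slices
-- ===== SOURCE A (Python) =====
-- from typing import Iterator, Tuple
--
-- def batch_slices(n_samples: int, batch_size: int, drop_last: bool = False) -> Iterator[Tuple[int, int]]:
--     """
--     Generate mini-batch index ranges.
--
--     Parameters
--     n_samples : int
--     batch_size : int
--     drop_last : bool
--
--     Returns
--     Iterator[tuple[int, int]]
--
--     Raises
--     ValueError
--         If inputs are invalid.
--
--     Time Complexity
--     O(n / batch_size)
--
--     Space Complexity
--     O(1)
--     """
--     if n_samples < 0: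
--         raise ValueError("n_samples must be non-negative.")
--     if batch_size <= 0:
--         raise ValueError("batch_size must be positive.")
--
--     start = 0
--     while start < n_samples:
--         end = min(start + batch_size, n_samples)
--         if drop_last and (end - start) < batch_size:
--             break
--         yield start, end
--         start = end
-- ===== SOURCE B (Python) =====
-- def batch_slices(n_samples: int, batch_size: int, drop_last: bool = False):
--     if n_samples < 0:
--         raise ValueError("n_samples must be non-negative.")
--     if batch_size <= 0:
--         raise ValueError("batch_size must be positive.")
--
--     if drop_last:
--         n_batches = n_samples // batch_size
--     else:
--         n_batches = (n_samples + batch_size - 1) // batch_size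
--     for i in range(n_batches):
--         start = i * batch_size
--         yield start, min(start + batch_size, n_samples)
-- ===== Notes on version B (the rewrite author's own statement) =====
-- stated objective: alternative
-- what changed: Replaces the stateful while-pointer with an in-loop drop_last break by a closed-form batch count (floor or ceiling division) followed by index arithmetic over range(n_batches).
import Mathlib
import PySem

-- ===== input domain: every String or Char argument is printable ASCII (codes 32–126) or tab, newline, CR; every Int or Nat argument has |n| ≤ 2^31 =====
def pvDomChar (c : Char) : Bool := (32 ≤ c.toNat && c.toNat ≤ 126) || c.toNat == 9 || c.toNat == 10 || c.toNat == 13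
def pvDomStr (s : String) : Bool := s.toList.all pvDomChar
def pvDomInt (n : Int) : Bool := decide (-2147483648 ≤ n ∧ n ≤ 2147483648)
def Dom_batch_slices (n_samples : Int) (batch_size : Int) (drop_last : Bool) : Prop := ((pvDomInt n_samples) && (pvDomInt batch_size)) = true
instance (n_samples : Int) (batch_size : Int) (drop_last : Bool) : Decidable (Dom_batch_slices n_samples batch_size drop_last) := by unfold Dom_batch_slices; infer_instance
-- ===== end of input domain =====

-- B replaces A's stateful while-pointer (with its in-loop drop_last break) by a closed-form
-- batch count (floor/ceiling division) and index arithmetic over range(n_batches); same cost.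

-- ===== PORT A =====
-- A's while loop, ported as fuel recursion (fuel n.toNat+1 always suffices on Pre_:
-- start advances by at least 1 per yield; outside Pre_ Python A raises ValueError).
def batchLoop (fuel : Nat) (n b : Int) (dl : Bool) (start : Int) : List (Int × Int) :=
  match fuel with
  | 0 => []
  | f + 1 =>
    if start < n then
      let e := min (start + b) n
      if dl && decide (e - start < b) then []
      else (start, e) :: batchLoop f n b dl e
    else []

def batch_slices (n_samples : Int) (batch_size : Int) (drop_last : Bool) : List (Int × Int) :=
  batchLoop (n_samples.toNat + 1) n_samples batch_size drop_last 0

-- ===== PORT B =====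
def batch_slices_alt (n_samples : Int) (batch_size : Int) (drop_last : Bool) : List (Int × Int) :=
  let nb := if drop_last then PySem.Int.floordiv n_samples batch_size
            else PySem.Int.floordiv (n_samples + batch_size - 1) batch_size
  (PySem.List.pyRange 0 nb 1).map
    (fun i => (i * batch_size, min (i * batch_size + batch_size) n_samples))

-- ===== PRECONDITION & SPEC =====
-- Pre_: exactly where Python A returns (it raises ValueError on n_samples < 0 or batch_size ≤ 0).
def Pre_batch_slices (n_samples : Int) (batch_size : Int) (drop_last : Bool) : Prop :=
  0 ≤ n_samples ∧ 0 < batch_size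
instance (n_samples : Int) (batch_size : Int) (drop_last : Bool) : Decidable (Pre_batch_slices n_samples batch_size drop_last) := by unfold Pre_batch_slices; infer_instance
def pvWitness_batch_slices : Int × Int × Bool := (7, 3, false)

def Spec_batch_slices (n_samples : Int) (batch_size : Int) (drop_last : Bool) (out : List (Int × Int)) : Prop := out = batch_slices_alt n_samples batch_size drop_last
instance (n_samples : Int) (batch_size : Int) (drop_last : Bool) (out : List (Int × Int)) : Decidable (Spec_batch_slices n_samples batch_size drop_last out) := by unfold Spec_batch_slices; infer_instance

-- ===== CLAIM (what is proved, stated in full; the proofs are below) =====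
def Claim_equal_batch_slices : Prop := ∀ (n_samples : Int) (batch_size : Int) (drop_last : Bool), Dom_batch_slices n_samples batch_size drop_last → Pre_batch_slices n_samples batch_size drop_last → Spec_batch_slices n_samples batch_size drop_last (batch_slices n_samples batch_size drop_last)

-- ===== LEMMAS AND PROOFS =====

lemma batchLoop_of_ge (fuel : Nat) (n b : Int) (dl : Bool) (s : Int) (h : n ≤ s) :
    batchLoop fuel n b dl s = [] := by
  cases fuel with
  | zero => rfl
  | succ f => simp [batchLoop, not_lt.mpr h]

-- Loop invariant: from start = j*b with enough fuel, A's loop produces exactly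
-- B's slices for indices j, j+1, …, nb-1.
lemma batchLoop_eq (n b : Int) (dl : Bool) (nb : Int) (hb : 0 < b) (_hn : 0 ≤ n)
    (hnb : nb = if dl then PySem.Int.floordiv n b
                else PySem.Int.floordiv (n + b - 1) b) :
    ∀ (fuel : Nat) (j : Int), j * b ≤ n → nb - j ≤ (fuel : Int) →
      batchLoop fuel n b dl (j * b) =
        (PySem.List.pyRange j nb 1).map (fun i => (i * b, min (i * b + b) n)) := by
  have hiff : ∀ q : Int, q ≤ nb ↔ q * b ≤ (if dl then n else n + b - 1) := by
    intro q
    subst hnb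
    cases dl <;> simp only [if_true, if_false, Bool.false_eq_true] <;>
      exact PySem.Int.le_floordiv_iff_mul_le hb
  intro fuel
  induction fuel with
  | zero =>
    intro j _ hfuel
    have hnbj : nb ≤ j := by exact_mod_cast (by simpa using hfuel)
    simp [batchLoop, PySem.List.pyRange_one_eq_nil hnbj]
  | succ f ih =>
    intro j hjb hfuel
    by_cases hjn : j < nb
    · -- one more yield
      have hj1 : (j + 1) * b ≤ (if dl then n else n + b - 1) := (hiff (j + 1)).mp hjn
      have hexp : (j + 1) * b = j * b + b := by ring
      rw [hexp] at hj1
      have hstart : j * b < n := by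
        cases dl <;> simp only [if_true, if_false, Bool.false_eq_true] at hj1 <;> linarith
      rw [PySem.List.pyRange_one_cons hjn]
      by_cases hfull : j * b + b ≤ n
      · -- full batch: e = (j+1)*b, recurse
        have he : min (j * b + b) n = j * b + b := min_eq_left hfull
        have hbreak : (dl && decide (min (j * b + b) n - j * b < b)) = false := by
          simp [he]
        simp only [batchLoop, if_pos hstart, hbreak, Bool.false_eq_true, if_false, List.map_cons]
        have hrec := ih (j + 1) (by rw [hexp]; exact hfull) (by push_cast at *; linarith)
        rw [hexp] at hrec
        rw [he, hrec]
      · -- last, partial batch (only when ¬dl): e = n, loop then terminates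
        have hdl : dl = false := by
          cases dl
          · rfl
          · simp only [if_true] at hj1; exact absurd hj1 hfull
        have hn' : n ≤ j * b + b := (not_le.mp hfull).le
        have he : min (j * b + b) n = n := min_eq_right hn'
        have hlast : nb ≤ j + 1 := by
          by_contra hc
          have h2 := (hiff (j + 2)).mp (by omega)
          rw [hdl] at h2
          simp only [Bool.false_eq_true, if_false] at h2
          have hexp2 : (j + 2) * b = j * b + b + b := by ring
          rw [hexp2] at h2
          linarith
        have htail : PySem.List.pyRange (j + 1) nb 1 = [] :=
          PySem.List.pyRange_one_eq_nil hlast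
        simp only [batchLoop, if_pos hstart, hdl, Bool.false_and, Bool.false_eq_true, if_false,
          List.map_cons, htail, List.map_nil, he]
        rw [batchLoop_of_ge _ _ _ _ _ le_rfl]
    · -- no more yields: loop stops (start ≥ n, or drop_last break)
      have hnbj : nb ≤ j := not_lt.mp hjn
      rw [PySem.List.pyRange_one_eq_nil hnbj, List.map_nil]
      have hj1 : ¬ (j + 1) * b ≤ (if dl then n else n + b - 1) := fun h =>
        absurd ((hiff (j + 1)).mpr h) (by omega)
      have hexp : (j + 1) * b = j * b + b := by ring
      rw [hexp] at hj1
      cases dl with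
      | false =>
        simp only [Bool.false_eq_true, if_false] at hj1
        have : n ≤ j * b := by linarith [not_le.mp hj1]
        exact batchLoop_of_ge _ _ _ _ _ this
      | true =>
        simp only [if_true] at hj1
        have hlt : n < j * b + b := not_le.mp hj1
        by_cases hs : j * b < n
        · have he : min (j * b + b) n = n := min_eq_right (le_of_lt hlt)
          have hbr : (true && decide (min (j * b + b) n - j * b < b)) = true := by
            simp [he]; linarith
          simp [batchLoop, hs, hbr]
        · exact batchLoop_of_ge _ _ _ _ _ (not_lt.mp hs)

lemma nb_le (n b : Int) (dl : Bool) (hb : 0 < b) (hn : 0 ≤ n) :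
    (if dl then PySem.Int.floordiv n b else PySem.Int.floordiv (n + b - 1) b) ≤ n := by
  set nb := if dl then PySem.Int.floordiv n b else PySem.Int.floordiv (n + b - 1) b with hnb
  have hiff : ∀ q : Int, q ≤ nb ↔ q * b ≤ (if dl then n else n + b - 1) := by
    intro q
    rw [hnb]
    cases dl <;> simp only [if_true, if_false, Bool.false_eq_true] <;>
      exact PySem.Int.le_floordiv_iff_mul_le hb
  have h1 : nb * b ≤ (if dl then n else n + b - 1) := (hiff nb).mp le_rfl
  have h0 : 0 ≤ nb := (hiff 0).mpr (by cases dl <;> simp <;> linarith)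
  by_contra hc
  rw [not_le] at hc
  have hm : (n + 1) * b ≤ nb * b := mul_le_mul_of_nonneg_right (by omega) (le_of_lt hb)
  have hnb2 : (n + 1) * b = n * b + b := by ring
  have hnn : n ≤ n * b := le_mul_of_one_le_right hn hb
  cases dl <;> simp only [if_true, if_false, Bool.false_eq_true] at h1 <;> linarith

-- ===== VERDICT (by name: the statement is the Claim_ definition above) =====
theorem batch_slices_spec : Claim_equal_batch_slices := by
  intro n b dl _ hpre
  obtain ⟨hn, hb⟩ := hpre
  unfold Spec_batch_slices batch_slices batch_slices_alt
  have h := batchLoop_eq n b dl _ hb hn rfl (n.toNat + 1) 0 (by simpa using hn)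
    (by
      have := nb_le n b dl hb hn
      have : ((n.toNat + 1 : Nat) : Int) = n + 1 := by omega
      push_cast
      omega)
  simpa using h
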